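-- pv_equiv track=rewrite | github.com/sav4n/security-dswe | playfair int/playfire_convert_j_to_i.py | playfair_converter
-- ===== SOURCE A (Python) =====
-- def playfair_converter(text):
--     text = text.upper()
--     # text="datasecurityjournal"
--     new_text = text
--     array = list(text)
--     for i in range(0, len(array)):
--         if (array[i] == 'J'):
--             array[i] = 'I'
--             new_text = new_text.replace('J', 'I')
--
--     return array, new_text
-- ===== SOURCE B (Python) =====
-- def playfair_converter(text):
--     new_text = text.upper().replace('J', 'I')
--     return list(new_text), new_text
-- ===== Notes on version B (the rewrite author's own statement) =====
-- stated objective: simpler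
-- what changed: B uppercases and does one global str.replace('J','I'), then derives the character list from the already-replaced string, removing A's per-index loop, branch, and repeated full-string replace calls.
import Mathlib
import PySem

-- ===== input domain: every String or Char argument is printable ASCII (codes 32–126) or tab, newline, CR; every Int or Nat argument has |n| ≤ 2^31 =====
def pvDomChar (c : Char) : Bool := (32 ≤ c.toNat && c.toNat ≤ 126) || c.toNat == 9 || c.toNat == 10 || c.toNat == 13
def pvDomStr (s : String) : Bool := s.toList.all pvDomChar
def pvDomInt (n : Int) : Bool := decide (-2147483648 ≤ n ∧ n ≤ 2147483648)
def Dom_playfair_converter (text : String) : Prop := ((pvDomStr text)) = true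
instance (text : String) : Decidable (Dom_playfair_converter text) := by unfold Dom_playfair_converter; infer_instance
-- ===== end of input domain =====

-- B replaces A's per-index loop (with a full-string replace on every 'J') by one upper+replace pass,
-- deriving the character list from the already-replaced string; objective: simpler (return value only).


-- ===== PORT A =====
def playfair_converter (text : String) : List String × String :=
  let text := PySem.Str.upper text
  let new_text := text
  let array := text.toList.map (fun c => String.ofList [c])
  (PySem.List.pyRange 0 (array.length : Int) 1).foldl
    (fun (st : List String × String) i =>
      if PySem.List.pyGetD st.1 i "" = "J" then
        (st.1.set i.toNat "I", PySem.Str.replace st.2 "J" "I")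
      else st)
    (array, new_text)

-- ===== PORT B =====
def playfair_converter_alt (text : String) : List String × String :=
  let new_text := PySem.Str.replace (PySem.Str.upper text) "J" "I"
  (new_text.toList.map (fun c => String.ofList [c]), new_text)

-- ===== PRECONDITION & SPEC =====
def Spec_playfair_converter (text : String) (out : List String × String) : Prop := out = playfair_converter_alt text
instance (text : String) (out : List String × String) : Decidable (Spec_playfair_converter text out) := by unfold Spec_playfair_converter; infer_instance

-- ===== CLAIM (what is proved, stated in full; the proofs are below) =====
def Claim_equal_playfair_converter : Prop := ∀ (text : String), Dom_playfair_converter text → Spec_playfair_converter text (playfair_converter text)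

-- ===== LEMMAS AND PROOFS =====

-- pvJ2I: the per-character effect of replacing 'J' by 'I'
def pvJ2I (c : Char) : Char := if c = 'J' then 'I' else c

lemma pvJ2I_idem (c : Char) : pvJ2I (pvJ2I c) = pvJ2I c := by
  unfold pvJ2I; split_ifs with h1 h2 <;> simp_all

lemma replace_go_step (f : Nat) (c : Char) (t acc : List Char) :
    PySem.Chars.replace.go ['J'] ['I'] (f + 1) (c :: t) acc
      = if c = 'J' then PySem.Chars.replace.go ['J'] ['I'] f t ('I' :: acc)
        else PySem.Chars.replace.go ['J'] ['I'] f t (c :: acc) := by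
  by_cases hc : c = 'J'
  · subst hc
    simp [PySem.Chars.replace.go, List.isPrefixOf]
  · simp only [PySem.Chars.replace.go, List.isPrefixOf]
    simp only [hc]
    simp
    intro h
    exact absurd h.symm hc

lemma replace_go_single (l : List Char) :
    ∀ (fuel : Nat) (acc : List Char), l.length ≤ fuel →
    PySem.Chars.replace.go ['J'] ['I'] fuel l acc = acc.reverse ++ l.map pvJ2I := by
  induction l with
  | nil =>
    intro fuel acc _
    cases fuel <;> simp [PySem.Chars.replace.go]
  | cons c t ih =>
    intro fuel acc hlen
    cases fuel with
    | zero => simp at hlen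
    | succ f =>
      rw [replace_go_step]
      by_cases hc : c = 'J'
      · rw [if_pos hc, ih f ('I' :: acc) (by simpa using hlen)]
        simp [pvJ2I, hc]
      · rw [if_neg hc, ih f (c :: acc) (by simpa using hlen)]
        simp [pvJ2I, hc]

lemma replace_single (cs : List Char) :
    PySem.Chars.replace cs ['J'] ['I'] = cs.map pvJ2I := by
  unfold PySem.Chars.replace
  simpa using replace_go_single cs cs.length [] le_rfl

lemma str_replace_toList (s : String) :
    (PySem.Str.replace s "J" "I").toList = s.toList.map pvJ2I := by
  rw [PySem.Str.toList_replace]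
  have hJ : ("J" : String).toList = ['J'] := by decide
  have hI : ("I" : String).toList = ['I'] := by decide
  rw [hJ, hI, replace_single]

lemma str_replace_idem (s : String) :
    PySem.Str.replace (PySem.Str.replace s "J" "I") "J" "I" = PySem.Str.replace s "J" "I" := by
  apply String.toList_inj.mp
  rw [str_replace_toList, str_replace_toList, List.map_map]
  exact List.map_congr_left (fun c _ => pvJ2I_idem c)

lemma str_replace_noJ (s : String) (h : 'J' ∉ s.toList) :
    PySem.Str.replace s "J" "I" = s := by
  apply String.toList_inj.mp
  rw [str_replace_toList]
  exact (List.map_congr_left (fun c hc => by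
    unfold pvJ2I; split_ifs with hh
    · exact absurd (hh ▸ hc) h
    · rfl)).trans (List.map_id _)

lemma mk1_eq_J_iff (c : Char) : (String.ofList [c] = "J") ↔ c = 'J' := by
  constructor
  · intro h
    have := congrArg String.toList h
    simpa using this
  · rintro rfl; rfl

-- loop invariant for A's index loop over the first k positions
lemma loopA_invariant (s : String) (k : Nat) (hk : k ≤ s.toList.length) :
    (PySem.List.pyRange 0 (k : Int) 1).foldl
      (fun (st : List String × String) i =>
        if PySem.List.pyGetD st.1 i "" = "J" then
          (st.1.set i.toNat "I", PySem.Str.replace st.2 "J" "I")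
        else st)
      (s.toList.map (fun c => String.ofList [c]), s) =
    ((s.toList.take k).map (fun c => String.ofList [pvJ2I c]) ++
       (s.toList.drop k).map (fun c => String.ofList [c]),
     if 'J' ∈ s.toList.take k then PySem.Str.replace s "J" "I" else s) := by
  induction k with
  | zero => simp [PySem.List.pyRange_one_eq_nil]
  | succ k ih =>
    have hk' : k < s.toList.length := by omega
    have hrange : PySem.List.pyRange 0 ((k : Int) + 1) 1
        = PySem.List.pyRange 0 (k : Int) 1 ++ [(k : Int)] :=
      PySem.List.pyRange_one_succ_right (by positivity)
    rw [show ((k + 1 : Nat) : Int) = (k : Int) + 1 from by push_cast; ring, hrange,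
        List.foldl_append, ih (by omega)]
    simp only [List.foldl_cons, List.foldl_nil]
    have hdrop : s.toList.drop k = s.toList[k] :: s.toList.drop (k + 1) :=
      (List.getElem_cons_drop hk').symm
    have hlen : ((s.toList.take k).map (fun c => String.ofList [pvJ2I c])).length = k := by
      rw [List.length_map, List.length_take]; omega
    have hget : PySem.List.pyGetD
        ((s.toList.take k).map (fun c => String.ofList [pvJ2I c]) ++
          (s.toList.drop k).map (fun c => String.ofList [c])) (k : Int) ""
        = String.ofList [s.toList[k]] := by
      rw [PySem.List.pyGetD_natCast, hdrop, List.map_cons, List.getD_eq_getElem?_getD,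
          List.getElem?_append_right hlen.le, hlen]
      simp
    have hset : (((s.toList.take k).map (fun c => String.ofList [pvJ2I c]) ++
          (s.toList.drop k).map (fun c => String.ofList [c])).set k "I")
        = (s.toList.take k).map (fun c => String.ofList [pvJ2I c]) ++
          ("I" :: (s.toList.drop (k+1)).map (fun c => String.ofList [c])) := by
      rw [hdrop, List.map_cons, List.set_append_right _ _ hlen.le, hlen]
      simp
    have htake : s.toList.take (k+1) = s.toList.take k ++ [s.toList[k]] := by
      rw [List.take_add_one]
      simp [List.getElem?_eq_getElem hk']
    have hI : String.ofList ['I'] = "I" := by decide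
    by_cases hJ : s.toList[k] = 'J'
    · rw [hget, if_pos ((mk1_eq_J_iff _).mpr hJ)]
      simp only [Int.toNat_natCast, hset, Prod.mk.injEq]
      refine ⟨?_, ?_⟩
      · rw [htake]
        simp [pvJ2I, hJ, hI]
      · rw [htake]
        rw [if_pos (show 'J' ∈ s.toList.take k ++ [s.toList[k]] by simp [hJ])]
        by_cases hmem : 'J' ∈ s.toList.take k
        · rw [if_pos hmem, str_replace_idem]
        · rw [if_neg hmem]
    · rw [hget, if_neg (fun h => hJ ((mk1_eq_J_iff _).mp h))]
      simp only [Prod.mk.injEq]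
      refine ⟨?_, ?_⟩
      · rw [htake, hdrop]
        simp only [List.map_append, List.map_cons, List.map_nil, List.append_assoc,
          List.nil_append, List.cons_append]
        simp [pvJ2I, hJ]
      · have hm : 'J' ∈ s.toList.take (k+1) ↔ 'J' ∈ s.toList.take k := by
          rw [htake, List.mem_append, List.mem_singleton]
          constructor
          · rintro (h | h)
            · exact h
            · exact absurd h.symm hJ
          · exact Or.inl
        by_cases hmem : 'J' ∈ s.toList.take k
        · rw [if_pos hmem, if_pos (hm.mpr hmem)]
        · rw [if_neg hmem, if_neg (fun h => hmem (hm.mp h))]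

-- ===== VERDICT (by name: the statement is the Claim_ definition above) =====
theorem playfair_converter_spec : Claim_equal_playfair_converter := by
  intro text _
  unfold Spec_playfair_converter playfair_converter playfair_converter_alt
  have h := loopA_invariant (PySem.Str.upper text) (PySem.Str.upper text).toList.length le_rfl
  simp only [List.take_length, List.drop_length, List.map_nil, List.append_nil] at h
  simp only [List.length_map]
  rw [h]
  have hfst : (PySem.Str.replace (PySem.Str.upper text) "J" "I").toList.map
        (fun c => String.ofList [c])
      = (PySem.Str.upper text).toList.map (fun c => String.ofList [pvJ2I c]) := by
    rw [str_replace_toList, List.map_map]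
    rfl
  by_cases hmem : 'J' ∈ (PySem.Str.upper text).toList
  · rw [if_pos hmem, hfst]
  · rw [if_neg hmem, hfst, str_replace_noJ _ hmem]
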